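-- pv_equiv track=rewrite | github.com/samcao1124/CS_1134 | hw2/jc10253_hw2_q6.py | count_lowercase
-- ===== SOURCE A (Python) =====
-- def count_lowercase(s,low,high):
--     if (len(s) == 0):
--         return 0
--     elif low == high:
--         if s[low].islower():
--             return(1)
--         else:
--             return(0)
--     mid = low + (high-low) // 2
--     left_count = count_lowercase(s,low,mid)
--     right_count = count_lowercase(s,mid+1,high)
--     return left_count + right_count
-- ===== SOURCE B (Python) =====
-- def count_lowercase(s, low, high):
--     if len(s) == 0:
--         return 0
--     return sum(1 for i in range(low, high + 1) if s[i].islower())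
-- ===== Notes on version B (the rewrite author's own statement) =====
-- stated objective: simpler
-- what changed: Replaces the divide-and-conquer recursion with a single iterative sum over range(low, high+1), removing all recursive calls and stack use.
-- crash fix: On a non-empty string with low > high, A recurses forever and raises RecursionError, while B's empty range returns 0. — e.g. on count_lowercase("a", 1, 0): A raises RecursionError, B returns 0
import Mathlib
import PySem

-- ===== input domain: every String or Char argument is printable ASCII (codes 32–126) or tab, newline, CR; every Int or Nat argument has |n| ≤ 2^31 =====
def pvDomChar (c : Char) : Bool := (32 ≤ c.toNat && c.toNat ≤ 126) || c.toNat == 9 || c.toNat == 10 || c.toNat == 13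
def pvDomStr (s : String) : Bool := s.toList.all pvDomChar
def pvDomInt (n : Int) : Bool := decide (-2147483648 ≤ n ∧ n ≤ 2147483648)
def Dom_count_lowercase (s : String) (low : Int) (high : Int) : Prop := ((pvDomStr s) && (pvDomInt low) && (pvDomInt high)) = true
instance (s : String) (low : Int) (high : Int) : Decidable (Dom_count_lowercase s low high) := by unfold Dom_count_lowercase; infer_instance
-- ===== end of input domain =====

-- B replaces A's divide-and-conquer recursion with a single iterative sum over the index range (objective: simpler).

-- ===== PORT A =====
-- A's recursion does not terminate when the string is non-empty and low > high; the fuel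
-- argument only makes the same computation total (it never runs out inside Pre_).
def countAfuel (cs : List Char) : Nat → Int → Int → Int
  | 0, _, _ => 0
  | fuel + 1, low, high =>
    if cs.length = 0 then 0
    else if low = high then
      (if PySem.Chars.islower (PySem.List.pyGetD cs low ' ') then 1 else 0)
    else
      let mid := low + PySem.Int.floordiv (high - low) 2
      countAfuel cs fuel low mid + countAfuel cs fuel (mid + 1) high

def count_lowercase (s : String) (low : Int) (high : Int) : Int :=
  countAfuel s.toList ((high - low).toNat + 1) low high

-- ===== PORT B =====
def count_lowercase_alt (s : String) (low : Int) (high : Int) : Int :=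
  if s.toList.length = 0 then 0
  else ((PySem.List.pyRange low (high + 1) 1).map
        (fun i => if PySem.Chars.islower (PySem.List.pyGetD s.toList i ' ') then (1 : Int) else 0)).sum

-- ===== PRECONDITION & SPEC =====
-- Pre_ excludes inputs where the Python programs raise: out-of-range indices (IndexError in
-- both A and B) and, for a non-empty string, low > high (A recurses forever, RecursionError).
def Pre_count_lowercase (s : String) (low : Int) (high : Int) : Prop :=
  s.toList.length = 0 ∨
    (low ≤ high ∧ -(s.toList.length : Int) ≤ low ∧ high < (s.toList.length : Int))
instance (s : String) (low : Int) (high : Int) : Decidable (Pre_count_lowercase s low high) := by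
  unfold Pre_count_lowercase; infer_instance

def pvWitness_count_lowercase : String × Int × Int := ("aB c", 0, 3)

-- On a non-empty string with low > high, A recurses forever (RecursionError) while B's empty
-- range returns 0 (checked by Claim_raises_count_lowercase, proved in count_lowercase_raises).
def Raises_count_lowercase (s : String) (low : Int) (high : Int) : Prop :=
  s.toList.length ≠ 0 ∧ high < low
instance (s : String) (low : Int) (high : Int) : Decidable (Raises_count_lowercase s low high) := by
  unfold Raises_count_lowercase; infer_instance
def pvRaiseWitness_count_lowercase : String × Int × Int := ("a", 1, 0)
def pvRaiseWitnessOut_count_lowercase : Int := 0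

def Spec_count_lowercase (s : String) (low : Int) (high : Int) (out : Int) : Prop :=
  out = count_lowercase_alt s low high
instance (s : String) (low : Int) (high : Int) (out : Int) : Decidable (Spec_count_lowercase s low high out) := by
  unfold Spec_count_lowercase; infer_instance

-- ===== CLAIM (what is proved, stated in full; the proofs are below) =====
def Claim_equal_count_lowercase : Prop := ∀ (s : String) (low : Int) (high : Int), Dom_count_lowercase s low high → Pre_count_lowercase s low high → Spec_count_lowercase s low high (count_lowercase s low high)

def Claim_raises_count_lowercase : Prop := (∀ (s : String) (low : Int) (high : Int), Dom_count_lowercase s low high → Raises_count_lowercase s low high → ¬ Pre_count_lowercase s low high) ∧ (Dom_count_lowercase (pvRaiseWitness_count_lowercase.1) (pvRaiseWitness_count_lowercase.2.1) (pvRaiseWitness_count_lowercase.2.2) ∧ Raises_count_lowercase (pvRaiseWitness_count_lowercase.1) (pvRaiseWitness_count_lowercase.2.1) (pvRaiseWitness_count_lowercase.2.2) ∧ count_lowercase_alt (pvRaiseWitness_count_lowercase.1) (pvRaiseWitness_count_lowercase.2.1) (pvRaiseWitness_count_lowercase.2.2) = pvRaiseWitnessOut_count_lowercase)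

-- ===== LEMMAS AND PROOFS =====

lemma countAfuel_eq (cs : List Char) : ∀ (fuel : Nat) (low high : Int),
    cs.length ≠ 0 → -(cs.length : Int) ≤ low → low ≤ high → high < (cs.length : Int) →
    (high - low).toNat < fuel →
    countAfuel cs fuel low high =
      ((PySem.List.pyRange low (high + 1) 1).map
        (fun i => if PySem.Chars.islower (PySem.List.pyGetD cs i ' ') then (1 : Int) else 0)).sum := by
  intro fuel
  induction fuel with
  | zero => intro low high _ _ _ _ h; omega
  | succ n ih =>
    intro low high hne hlo hle hhi _
    by_cases heq : low = high
    · subst heq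
      rw [show low + 1 = low + 1 from rfl, PySem.List.pyRange_one_singleton]
      simp [countAfuel, hne]
    · have hlt : low < high := lt_of_le_of_ne hle heq
      have hd : PySem.Int.floordiv (high - low) 2 = (high - low) / 2 :=
        PySem.Int.floordiv_eq_ediv_of_pos (by omega)
      simp only [countAfuel, if_neg hne, if_neg heq, hd]
      set mid := low + (high - low) / 2 with hmid
      have hb1 : low ≤ mid := by omega
      have hb2 : mid < high := by omega
      rw [PySem.List.pyRange_one_append low (mid + 1) (high + 1) (by omega) (by omega),
          List.map_append, List.sum_append,
          ih low mid hne (by omega) (by omega) (by omega) (by omega),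
          ih (mid + 1) high hne (by omega) (by omega) (by omega) (by omega)]

-- ===== VERDICT (by name: the statement is the Claim_ definition above) =====
theorem count_lowercase_spec : Claim_equal_count_lowercase := by
  unfold Claim_equal_count_lowercase
  intro s low high _ hpre
  unfold Spec_count_lowercase count_lowercase count_lowercase_alt
  rcases hpre with h0 | ⟨h1, h2, h3⟩
  · simp [countAfuel, h0]
  · rw [if_neg (by omega)]
    exact countAfuel_eq s.toList ((high - low).toNat + 1) low high (by omega) h2 h1 h3 (by omega)

theorem count_lowercase_raises : Claim_raises_count_lowercase := by
  unfold Claim_raises_count_lowercase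
  constructor
  · intro s low high _ ⟨ha, hb⟩ hpre
    rcases hpre with h | h <;> omega
  · exact ⟨by decide, by decide, by decide⟩

-- self-check of the raise witness: B's port indeed returns the stated literal there
theorem pvRaiseWitnessOut_ok :
    count_lowercase_alt pvRaiseWitness_count_lowercase.1 pvRaiseWitness_count_lowercase.2.1
      pvRaiseWitness_count_lowercase.2.2 = pvRaiseWitnessOut_count_lowercase :=
  count_lowercase_raises.2.2.2
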